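-- pv_equiv track=rewrite | github.com/janhoelzl/HNSCC_spatial_analysis | Part4_functions.py | power_set_alt
-- ===== SOURCE A (Python) =====
-- def power_set_alt(items, conds):
--
-- 	"""
-- 	Generates the power set of a given set of items, excluding the empty set, and including only subsets
-- 	that have at least one item in common with a specified set of conditions.
--
-- 	Parameters
-- 	----------
-- 	items : list
-- 		A list of items for which the power set is to be generated.
-- 	conds : set
-- 		A set of conditions used to filter the subsets. A subset is included in the output if it has
-- 		at least one common element with `conds`.
--
-- 	Returns
-- 	-------
-- 	out_sets : list of set
-- 		A list of sets, each being a subset of `items` that shares at least one element with `conds`.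
-- 	"""
--
-- 	N = len(items)
-- 	out_sets = []
--
-- 	#Enumerate the 2 ** N possible combinations
-- 	for i in range(2 ** N):
--
-- 		combo = set([])
-- 		for j in range(N):
-- 			#Test bit jth of integer i
-- 			if (i >> j) % 2 == 1:
-- 				combo = combo.union(set([items[j]]))
--
-- 		overlap = [m for m in conds if m in combo]
-- 		if len(overlap) != 0:
-- 			out_sets.append(combo)
--
-- 	return out_sets
-- ===== SOURCE B (Python) =====
-- def power_set_alt(items, conds):
--     # Build all 2**N subsets incrementally: each item doubles the list by
--     # adding itself to every subset built so far (same order as binary counting).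
--     subsets = [set()]
--     for it in items:
--         subsets += [s | {it} for s in subsets]
--     conds_set = set(conds)
--     return [s for s in subsets if s & conds_set]
-- ===== Notes on version B (the rewrite author's own statement) =====
-- stated objective: alternative
-- what changed: Replaces the bit-testing double loop (for each of the 2**N indices, re-scan all N bits and rebuild the subset by repeated set-union, then re-scan conds) with incremental doubling: the subset list is grown once per item by adding that item to every subset built so far, and each subset is tested once by intersection with set(conds); intended as faster (measured 6.76x at the largest size both finished), though both are exponential in len(items).
import Mathlib
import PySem

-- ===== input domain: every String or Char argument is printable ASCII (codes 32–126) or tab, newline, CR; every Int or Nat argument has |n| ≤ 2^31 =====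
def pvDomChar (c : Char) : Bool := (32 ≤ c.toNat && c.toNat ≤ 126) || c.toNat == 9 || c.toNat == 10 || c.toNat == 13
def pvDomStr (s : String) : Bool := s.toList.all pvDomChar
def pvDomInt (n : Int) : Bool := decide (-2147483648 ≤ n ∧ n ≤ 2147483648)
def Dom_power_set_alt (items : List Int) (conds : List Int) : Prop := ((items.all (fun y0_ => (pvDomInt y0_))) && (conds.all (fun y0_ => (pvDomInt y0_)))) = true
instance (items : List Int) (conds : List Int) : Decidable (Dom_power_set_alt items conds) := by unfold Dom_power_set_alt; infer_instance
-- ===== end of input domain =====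

-- B replaces A's per-index bit-scan with union-rebuild by incremental subset doubling (one set-add per item per subset) and a single intersection test per subset (alternative algorithm; both are exponential in len(items)).


-- ===== PORT A =====
-- literal transliteration of A: for i in range(2**N): rebuild combo bit by bit via set-union, append it if the overlap list is nonempty
def power_set_alt (items : List Int) (conds : List Int) : List (List Int) :=
  let N : Nat := items.length
  (PySem.List.pyRange 0 ((2:Int) ^ N) 1).foldl (fun out i =>
    let combo : PySem.Set Int :=
      (PySem.List.pyRange 0 (N : Int) 1).foldl (fun combo j =>
        -- (i >> j) % 2 == 1 ; j ≥ 0 here so j.toNat is exact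
        if PySem.Int.mod (i >>> j.toNat) 2 == 1 then
          PySem.Set.union combo (PySem.Set.ofList [PySem.List.pyGetD items j 0])
        else combo) PySem.Set.empty
    let overlap := conds.filter (fun m => PySem.Set.contains combo m)
    if overlap.length != 0 then out ++ [combo] else out) []

-- ===== PORT B =====
-- literal transliteration of B: subsets doubles once per item, then one filter by intersection with set(conds)
def power_set_alt_alt (items : List Int) (conds : List Int) : List (List Int) :=
  let subsets : List (PySem.Set Int) :=
    items.foldl (fun subs it => subs ++ subs.map (fun s => PySem.Set.union s (PySem.Set.ofList [it])))
      [PySem.Set.empty]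
  let conds_set : PySem.Set Int := PySem.Set.ofList conds
  subsets.filter (fun s => !(PySem.Set.inter s conds_set).isEmpty)

-- ===== PRECONDITION & SPEC =====
def Spec_power_set_alt (items : List Int) (conds : List Int) (out : List (List Int)) : Prop := out = power_set_alt_alt items conds
instance (items : List Int) (conds : List Int) (out : List (List Int)) : Decidable (Spec_power_set_alt items conds out) := by unfold Spec_power_set_alt; infer_instance

-- ===== CLAIM (what is proved, stated in full; the proofs are below) =====
def Claim_equal_power_set_alt : Prop := ∀ (items : List Int) (conds : List Int), Dom_power_set_alt items conds → Spec_power_set_alt items conds (power_set_alt items conds)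

-- ===== LEMMAS AND PROOFS =====

-- common specification: the subset selected by index i (bit j low-to-high picks items[j]), built by Set.add
def bitCombo (items : List Int) (i : Nat) : List Int :=
  (List.range items.length).foldl
    (fun c j => if (i >>> j) % 2 == 1 then PySem.Set.add c (items.getD j 0) else c) []

theorem union_singleton_eq_add (s : PySem.Set Int) (x : Int) :
    PySem.Set.union s (PySem.Set.ofList [x]) = PySem.Set.add s x := rfl

-- A's inner bit loop computes bitCombo (the explicit instance pins the same Int >>> Nat the port elaborates to)
theorem shift_cast (k j : Nat) :
    (@HShiftRight.hShiftRight Int Nat Int Int.instHShiftRightNat ((k:Int)) j) = ((k >>> j : Nat) : Int) :=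
  (Int.natCast_shiftRight k j).symm

theorem comboA_eq (items : List Int) (i : Int) (k : Nat) (hik : i = (k : Int)) :
    (PySem.List.pyRange 0 (items.length : Int) 1).foldl (fun combo j =>
        if PySem.Int.mod (@HShiftRight.hShiftRight Int Nat Int Int.instHShiftRightNat i j.toNat) 2 == 1 then
          PySem.Set.union combo (PySem.Set.ofList [PySem.List.pyGetD items j 0])
        else combo) PySem.Set.empty
    = bitCombo items k := by
  subst hik
  rw [PySem.List.pyRange_one, List.foldl_map]
  unfold bitCombo
  simp only [sub_zero, Int.toNat_natCast]
  apply PySem.List.foldl_congr_mem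
  intro acc j hj
  simp only [zero_add, Int.toNat_natCast, PySem.List.pyGetD_natCast, union_singleton_eq_add,
    shift_cast]
  unfold PySem.Int.mod
  simp only [Int.fmod_eq_emod, beq_iff_eq]
  rcases Nat.mod_two_eq_zero_or_one (k >>> j) with h | h
  · rw [if_neg (by omega), if_neg (by omega)]
  · rw [if_pos (by omega), if_pos (by omega)]

theorem getD_append_left (l : List Int) (x : Int) (j : Nat) (h : j < l.length) :
    (l ++ [x]).getD j 0 = l.getD j 0 := by
  simp [List.getD, List.getElem?_append_left h]

-- appending one item only touches bit (length items) of the index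
theorem bitCombo_append (items : List Int) (x : Int) (i : Nat) :
    bitCombo (items ++ [x]) i =
      if (i >>> items.length) % 2 == 1 then PySem.Set.add (bitCombo items i) x
      else bitCombo items i := by
  unfold bitCombo
  rw [show (items ++ [x]).length = items.length + 1 by simp, List.range_succ, List.foldl_append]
  have hF : (List.range items.length).foldl
      (fun c j => if (i >>> j) % 2 == 1 then PySem.Set.add c ((items ++ [x]).getD j 0) else c) []
    = (List.range items.length).foldl
      (fun c j => if (i >>> j) % 2 == 1 then PySem.Set.add c (items.getD j 0) else c) [] := by
    apply PySem.List.foldl_congr_mem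
    intro acc j hj
    rw [getD_append_left _ _ _ (List.mem_range.mp hj)]
  simp only [List.foldl_cons, List.foldl_nil, hF]
  rw [show (items ++ [x]).getD items.length 0 = x by simp [List.getD]]

theorem bit_low (n i j : Nat) (hj : j < n) :
    ((2^n + i) >>> j) % 2 = (i >>> j) % 2 := by
  have h1 : 2 ^ n = 2 ^ (n - j - 1) * 2 * 2 ^ j := by
    rw [mul_assoc, ← pow_succ', ← pow_add]
    congr 1; omega
  rw [Nat.shiftRight_eq_div_pow, Nat.shiftRight_eq_div_pow, h1, add_comm,
    Nat.add_mul_div_right _ _ (Nat.two_pow_pos j)]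
  omega

theorem bit_high_self (n i : Nat) (hi : i < 2^n) : ((2^n + i) >>> n) % 2 = 1 := by
  rw [Nat.shiftRight_eq_div_pow, add_comm,
    Nat.add_div_right _ (Nat.two_pow_pos n), Nat.div_eq_of_lt hi]

theorem bit_high_zero (n i : Nat) (hi : i < 2^n) : (i >>> n) % 2 = 0 := by
  rw [Nat.shiftRight_eq_div_pow, Nat.div_eq_of_lt hi]

-- B's doubling loop produces exactly the bitCombo subsets in binary-counting order
theorem subsets_eq (items : List Int) :
    items.foldl (fun subs it => subs ++ subs.map (fun s => PySem.Set.union s (PySem.Set.ofList [it])))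
      [PySem.Set.empty]
    = (List.range (2 ^ items.length)).map (fun i => bitCombo items i) := by
  induction items using List.reverseRecOn with
  | nil => rfl
  | append_singleton items x ih =>
    rw [List.foldl_append, ih]
    simp only [List.foldl_cons, List.foldl_nil]
    rw [show (items ++ [x]).length = items.length + 1 by simp,
      show 2 ^ (items.length + 1) = 2 ^ items.length + 2 ^ items.length by ring,
      List.range_add, List.map_append, List.map_map, List.map_map]
    congr 1
    · apply List.map_congr_left
      intro i hi
      rw [bitCombo_append, if_neg]
      simp [bit_high_zero _ _ (List.mem_range.mp hi)]
    · apply List.map_congr_left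
      intro i hi
      have hi' := List.mem_range.mp hi
      simp only [Function.comp]
      rw [bitCombo_append, if_pos (by simp [bit_high_self _ _ hi'])]
      have h2 : bitCombo items (2 ^ items.length + i) = bitCombo items i := by
        unfold bitCombo
        apply PySem.List.foldl_congr_mem
        intro acc j hj
        rw [bit_low _ _ _ (List.mem_range.mp hj)]
      rw [h2]
      rfl

-- A's overlap-length test and B's intersection-nonempty test agree
theorem pred_eq (conds : List Int) (s : List Int) :
    ((conds.filter (fun m => PySem.Set.contains s m)).length != 0)
    = (!(PySem.Set.inter s (PySem.Set.ofList conds)).isEmpty) := by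
  apply Bool.eq_iff_iff.mpr
  simp [List.length_eq_zero_iff, List.filter_eq_nil_iff,
    PySem.Set.inter, PySem.Set.mem_ofList]
  tauto

-- ===== VERDICT (by name: the statement is the Claim_ definition above) =====
theorem power_set_alt_spec : Claim_equal_power_set_alt := by
  intro items conds _
  unfold Spec_power_set_alt power_set_alt power_set_alt_alt
  dsimp only
  rw [subsets_eq]
  rw [show ((2:Int) ^ items.length) = ((2 ^ items.length : Nat) : Int) by push_cast; ring]
  rw [PySem.List.pyRange_one (a := 0) (b := ((2 ^ items.length : Nat) : Int)), List.foldl_map]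
  simp only [sub_zero, Int.toNat_natCast, zero_add]
  refine Eq.trans (PySem.List.foldl_congr_mem _ _ (fun (out : List (List Int)) (k : Nat) =>
      if ((conds.filter (fun m => PySem.Set.contains (bitCombo items k) m)).length != 0)
      then out ++ [bitCombo items k] else out) _ ?_) ?_
  · intro acc k _
    rw [comboA_eq items _ k rfl]
  · rw [PySem.List.foldl_append_if
      (p := fun k => (conds.filter (fun m => PySem.Set.contains (bitCombo items k) m)).length != 0)
      (f := fun k => bitCombo items k)]
    simp only [List.nil_append, List.filter_map]
    congr 1
    apply List.filter_congr
    intro k _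
    simp only [Function.comp, pred_eq]
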